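-- pv_equiv track=rewrite | github.com/sparkyuniverzum/Dataverse | app/infrastructure/runtime/parser/parser_legacy_service.py | _count_top_level_operator
-- ===== SOURCE A (Python) =====
-- def _count_top_level_operator(text: str, operator: str) -> int:
--     count = 0
--     depth = 0
--     quote: str | None = None
--     for ch in text:
--         if ch in {"'", '"'}:
--             if quote is None:
--                 quote = ch
--             elif quote == ch:
--                 quote = None
--             continue
--         if quote is not None:
--             continue
--         if ch == "(":
--             depth += 1
--             continue
--         if ch == ")":
--             depth = max(0, depth - 1)
--             continue
--         if ch == operator and depth == 0:
--             count += 1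
--     return count
-- ===== SOURCE B (Python) =====
-- def _skip_paren(text, i):
--     """Return the index just past the parenthesised region opened before i."""
--     depth = 1
--     n = len(text)
--     while i < n and depth:
--         ch = text[i]
--         if ch in ("'", '"'):
--             j = text.find(ch, i + 1)
--             i = n if j == -1 else j + 1
--             continue
--         if ch == "(":
--             depth += 1
--         elif ch == ")":
--             depth -= 1
--         i += 1
--     return i
--
--
-- def _count_top_level_operator(text: str, operator: str) -> int:
--     count = 0
--     i = 0
--     n = len(text)
--     while i < n:
--         ch = text[i]
--         if ch in ("'", '"'):
--             j = text.find(ch, i + 1)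
--             i = n if j == -1 else j + 1
--         elif ch == "(":
--             i = _skip_paren(text, i + 1)
--         elif ch == ")":
--             i += 1  # stray close paren at top level: not countable content
--         else:
--             if ch == operator:
--                 count += 1
--             i += 1
--     return count
-- ===== Notes on version B (the rewrite author's own statement) =====
-- stated objective: alternative
-- what changed: B replaces A's per-character state machine (count, depth, quote) with a region-skipping scanner: quoted regions are jumped over via str.find, a parenthesised region is consumed by a separate nested skip routine, and counting only ever happens in genuinely top-level code; A instead carries depth/quote state through every character.
import Mathlib
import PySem

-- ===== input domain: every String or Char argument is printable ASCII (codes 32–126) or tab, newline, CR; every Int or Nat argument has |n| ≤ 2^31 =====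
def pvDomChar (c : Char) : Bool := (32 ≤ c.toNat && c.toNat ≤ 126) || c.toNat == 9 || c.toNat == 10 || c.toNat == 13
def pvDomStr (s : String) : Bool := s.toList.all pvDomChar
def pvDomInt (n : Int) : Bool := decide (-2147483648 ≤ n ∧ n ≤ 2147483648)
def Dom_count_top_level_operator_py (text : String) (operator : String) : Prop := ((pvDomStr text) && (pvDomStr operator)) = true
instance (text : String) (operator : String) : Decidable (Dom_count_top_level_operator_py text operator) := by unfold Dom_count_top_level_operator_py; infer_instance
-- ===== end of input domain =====

-- B is a region-skipping scanner (jump past quoted/parenthesised regions, count only top-level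
-- code) instead of A's per-character (count, depth, quote) state machine; same cost, different algorithm.

-- ===== PORT A =====
-- A's for-loop over text with state (count, depth, quote); branch order as in the Python.
def pvLoopA (operator : String) : List Char → Int → Int → Option Char → Int
  | [], count, _, _ => count
  | ch :: rest, count, depth, quote =>
    if ch = '\'' ∨ ch = '"' then
      if quote = none then pvLoopA operator rest count depth (some ch)
      else if quote = some ch then pvLoopA operator rest count depth none
      else pvLoopA operator rest count depth quote
    else if quote ≠ none then pvLoopA operator rest count depth quote
    else if ch = '(' then pvLoopA operator rest count (depth + 1) quote
    else if ch = ')' then pvLoopA operator rest count (max 0 (depth - 1)) quote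
    -- Python 'ch == operator': the one-char string of ch equals operator
    else if String.singleton ch = operator ∧ depth = 0 then pvLoopA operator rest (count + 1) depth quote
    else pvLoopA operator rest count depth quote

def count_top_level_operator_py (text : String) (operator : String) : Int :=
  pvLoopA operator text.toList 0 0 none

-- ===== PORT B =====
-- Python's 'j = text.find(ch, i+1); i = n if j == -1 else j + 1' on a list suffix: drop up to
-- and including the first occurrence of q (all of it if q does not occur).
def pvSkipQuote (q : Char) : List Char → List Char
  | [] => []
  | c :: rest => if c = q then rest else pvSkipQuote q rest

theorem pvSkipQuote_length (q : Char) (cs : List Char) : (pvSkipQuote q cs).length ≤ cs.length := by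
  induction cs with
  | nil => simp [pvSkipQuote]
  | cons c rest ih =>
    simp only [pvSkipQuote]
    split_ifs
    · simp
    · simp only [List.length_cons]; omega

-- B's _skip_paren: consume the parenthesised region (depth starts at 1), return the suffix after it.
def pvSkipParen : List Char → Int → List Char
  | [], _ => []
  | c :: rest, depth =>
    if c = '\'' ∨ c = '"' then pvSkipParen (pvSkipQuote c rest) depth
    else if c = '(' then pvSkipParen rest (depth + 1)
    else if c = ')' then (if depth - 1 = 0 then rest else pvSkipParen rest (depth - 1))
    else pvSkipParen rest depth
termination_by cs _ => cs.length
decreasing_by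
  · exact Nat.lt_succ_of_le (pvSkipQuote_length _ _)
  all_goals simp

theorem pvSkipParen_length_aux : ∀ (n : Nat) (cs : List Char), cs.length ≤ n →
    ∀ (d : Int), (pvSkipParen cs d).length ≤ cs.length := by
  intro n
  induction n with
  | zero =>
    intro cs h d
    have : cs = [] := List.eq_nil_of_length_eq_zero (Nat.le_zero.mp h)
    subst this; simp [pvSkipParen]
  | succ n ih =>
    intro cs h d
    match cs with
    | [] => simp [pvSkipParen]
    | c :: rest =>
      simp only [List.length_cons, Nat.succ_le_succ_iff] at h
      rw [pvSkipParen]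
      split_ifs with h1 h2 h3 h4
      · exact le_trans (ih _ (le_trans (pvSkipQuote_length _ _) h) d)
          (le_trans (pvSkipQuote_length _ _) (by simp))
      · exact le_trans (ih _ h _) (by simp)
      · simp
      · exact le_trans (ih _ h _) (by simp)
      · exact le_trans (ih _ h _) (by simp)

theorem pvSkipParen_length (cs : List Char) (d : Int) : (pvSkipParen cs d).length ≤ cs.length :=
  pvSkipParen_length_aux cs.length cs le_rfl d

-- B's main while-loop: skip quoted and parenthesised regions, count top-level matches.
def pvLoopB (operator : String) : List Char → Int → Int
  | [], count => count
  | c :: rest, count =>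
    if c = '\'' ∨ c = '"' then pvLoopB operator (pvSkipQuote c rest) count
    else if c = '(' then pvLoopB operator (pvSkipParen rest 1) count
    else if c = ')' then pvLoopB operator rest count
    else if String.singleton c = operator then pvLoopB operator rest (count + 1)
    else pvLoopB operator rest count
termination_by cs _ => cs.length
decreasing_by
  · exact Nat.lt_succ_of_le (pvSkipQuote_length _ _)
  · exact Nat.lt_succ_of_le (pvSkipParen_length _ _)
  all_goals simp

def count_top_level_operator_py_alt (text : String) (operator : String) : Int :=
  pvLoopB operator text.toList 0

-- ===== PRECONDITION & SPEC =====
def Spec_count_top_level_operator_py (text : String) (operator : String) (out : Int) : Prop := out = count_top_level_operator_py_alt text operator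
instance (text : String) (operator : String) (out : Int) : Decidable (Spec_count_top_level_operator_py text operator out) := by unfold Spec_count_top_level_operator_py; infer_instance

-- ===== CLAIM (what is proved, stated in full; the proofs are below) =====
def Claim_equal_count_top_level_operator_py : Prop := ∀ (text : String) (operator : String), Dom_count_top_level_operator_py text operator → Spec_count_top_level_operator_py text operator (count_top_level_operator_py text operator)

-- ===== LEMMAS AND PROOFS =====
-- While A is inside a quote it only scans for the matching quote char: skipping is exact.
theorem pvLoopA_quote (op : String) (q : Char) (hqc : q = '\'' ∨ q = '"')
    (cs : List Char) (cnt d : Int) :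
    pvLoopA op cs cnt d (some q) = pvLoopA op (pvSkipQuote q cs) cnt d none := by
  induction cs generalizing cnt with
  | nil => simp [pvLoopA, pvSkipQuote]
  | cons c rest ih =>
    by_cases hq : c = '\'' ∨ c = '"'
    · by_cases he : q = c
      · subst he
        simp [pvLoopA, pvSkipQuote, if_pos hq]
      · rw [pvLoopA, if_pos hq,
          if_neg (show ¬(some q : Option Char) = none by simp),
          if_neg (by simpa using he), pvSkipQuote, if_neg (fun h => he h.symm)]
        exact ih cnt
    · have he : c ≠ q := fun h => hq (h ▸ hqc)
      rw [pvLoopA, if_neg hq, if_pos (show (some q : Option Char) ≠ none by simp),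
        pvSkipQuote, if_neg he]
      exact ih cnt

-- While A is at depth ≥ 1 it counts nothing until depth returns to 0: the paren skip is exact.
theorem pvLoopA_paren (op : String) : ∀ (n : Nat) (cs : List Char), cs.length ≤ n →
    ∀ (cnt d : Int), 1 ≤ d →
    pvLoopA op cs cnt d none = pvLoopA op (pvSkipParen cs d) cnt 0 none := by
  intro n
  induction n with
  | zero =>
    intro cs h cnt d _
    have : cs = [] := List.eq_nil_of_length_eq_zero (Nat.le_zero.mp h)
    subst this; simp [pvLoopA, pvSkipParen]
  | succ n ih =>
    intro cs h cnt d hd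
    match cs with
    | [] => simp [pvLoopA, pvSkipParen]
    | c :: rest =>
      simp only [List.length_cons, Nat.succ_le_succ_iff] at h
      by_cases hq : c = '\'' ∨ c = '"'
      · rw [pvLoopA, if_pos hq, if_pos rfl, pvLoopA_quote op c hq, pvSkipParen, if_pos hq]
        exact ih _ (le_trans (pvSkipQuote_length _ _) h) cnt d hd
      · by_cases ho : c = '('
        · rw [pvLoopA, if_neg hq, if_neg (by simp), if_pos ho,
            pvSkipParen, if_neg hq, if_pos ho]
          exact ih _ h cnt (d + 1) (by omega)
        · by_cases hc : c = ')'
          · rw [pvLoopA, if_neg hq, if_neg (by simp), if_neg ho, if_pos hc,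
              pvSkipParen, if_neg hq, if_neg ho, if_pos hc]
            have hm : max 0 (d - 1) = d - 1 := by omega
            by_cases h0 : d - 1 = 0
            · rw [if_pos h0, hm, h0]
            · rw [if_neg h0, hm]
              exact ih _ h cnt (d - 1) (by omega)
          · rw [pvLoopA, if_neg hq, if_neg (by simp), if_neg ho, if_neg hc,
              if_neg (show ¬(String.singleton c = op ∧ d = 0) from fun hx => by omega),
              pvSkipParen, if_neg hq, if_neg ho, if_neg hc]
            exact ih _ h cnt d hd

theorem pvLoop_main (op : String) : ∀ (n : Nat) (cs : List Char), cs.length ≤ n →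
    ∀ (cnt : Int), pvLoopA op cs cnt 0 none = pvLoopB op cs cnt := by
  intro n
  induction n with
  | zero =>
    intro cs h cnt
    have : cs = [] := List.eq_nil_of_length_eq_zero (Nat.le_zero.mp h)
    subst this; simp [pvLoopA, pvLoopB]
  | succ n ih =>
    intro cs h cnt
    match cs with
    | [] => simp [pvLoopA, pvLoopB]
    | c :: rest =>
      simp only [List.length_cons, Nat.succ_le_succ_iff] at h
      by_cases hq : c = '\'' ∨ c = '"'
      · rw [pvLoopA, if_pos hq, if_pos rfl, pvLoopA_quote op c hq, pvLoopB, if_pos hq]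
        exact ih _ (le_trans (pvSkipQuote_length _ _) h) cnt
      · by_cases ho : c = '('
        · rw [pvLoopA, if_neg hq, if_neg (by simp), if_pos ho,
            pvLoopB, if_neg hq, if_pos ho,
            pvLoopA_paren op rest.length rest le_rfl cnt (0 + 1) (by norm_num),
            show (0:Int) + 1 = 1 by norm_num]
          exact ih _ (le_trans (pvSkipParen_length _ _) h) cnt
        · by_cases hc : c = ')'
          · rw [pvLoopA, if_neg hq, if_neg (by simp), if_neg ho, if_pos hc,
              pvLoopB, if_neg hq, if_neg ho, if_pos hc]
            have : max 0 ((0:Int) - 1) = 0 := by omega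
            rw [this]
            exact ih _ h cnt
          · by_cases hm : String.singleton c = op
            · rw [pvLoopA, if_neg hq, if_neg (by simp), if_neg ho, if_neg hc,
                if_pos ⟨hm, rfl⟩, pvLoopB, if_neg hq, if_neg ho, if_neg hc, if_pos hm]
              exact ih _ h (cnt + 1)
            · rw [pvLoopA, if_neg hq, if_neg (by simp), if_neg ho, if_neg hc,
                if_neg (fun hx => hm hx.1), pvLoopB, if_neg hq, if_neg ho, if_neg hc, if_neg hm]
              exact ih _ h cnt

-- ===== VERDICT (by name: the statement is the Claim_ definition above) =====
theorem count_top_level_operator_py_spec : Claim_equal_count_top_level_operator_py := by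
  intro text operator _
  unfold Spec_count_top_level_operator_py count_top_level_operator_py count_top_level_operator_py_alt
  exact pvLoop_main operator text.toList.length text.toList le_rfl 0
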